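-- pv_equiv track=rewrite | github.com/kesavadatta2410/Bio-Gas-Prediction | src/data_quality.py | assign_sensor_groups
-- ===== SOURCE A (Python) =====
-- SENSOR_GROUPS = {
--     "pH_alkalinity": ["pH", "pH_lab", "Alkalinity", "alkalinity"],
--     "temperature":   ["Temperature", "Temp", "temperature", "temp"],
--     "flow":          ["FlowRate", "Flow", "flow", "HRT", "SRT"],
--     "organic":       ["COD", "COD_in", "COD_out", "VFA", "BOD", "substrate"],
--     "gas":           ["GasFlow", "BiogasFlow", "MethaneFlow", "biogas", "methane"],
--     "solids":        ["TotalSolids", "VolatileSolids", "TSS", "VSS", "MLSS"],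
--     "nutrients":     ["Ammonia", "TKN", "Phosphorus", "Nitrogen"],
-- }
--
-- def assign_sensor_groups(feature_cols: list) -> dict:
--     """
--     Maps each feature to a sensor group.
--     Returns: {group_name: [indices_in_feature_cols]}
--     """
--     col_lower = [c.lower() for c in feature_cols]
--     group_indices = {g: [] for g in SENSOR_GROUPS}
--
--     for i, col in enumerate(col_lower):
--         assigned = False
--         for group, keywords in SENSOR_GROUPS.items():
--             if any(kw.lower() in col for kw in keywords):
--                 group_indices[group].append(i)
--                 assigned = True
--                 break
--         if not assigned:
--             group_indices.setdefault("other", []).append(i)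
--
--     # Remove empty groups
--     return {k: v for k, v in group_indices.items() if v}
-- ===== SOURCE B (Python) =====
-- SENSOR_GROUPS = {
--     "pH_alkalinity": ["pH", "pH_lab", "Alkalinity", "alkalinity"],
--     "temperature":   ["Temperature", "Temp", "temperature", "temp"],
--     "flow":          ["FlowRate", "Flow", "flow", "HRT", "SRT"],
--     "organic":       ["COD", "COD_in", "COD_out", "VFA", "BOD", "substrate"],
--     "gas":           ["GasFlow", "BiogasFlow", "MethaneFlow", "biogas", "methane"],
--     "solids":        ["TotalSolids", "VolatileSolids", "TSS", "VSS", "MLSS"],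
--     "nutrients":     ["Ammonia", "TKN", "Phosphorus", "Nitrogen"],
-- }
--
-- def assign_sensor_groups(feature_cols: list) -> dict:
--     """Group-major assignment: walk SENSOR_GROUPS in order, each group claims
--     the still-unassigned columns that contain one of its keywords; leftovers
--     become 'other'."""
--     remaining = list(enumerate(c.lower() for c in feature_cols))
--     result = {}
--     for group, keywords in SENSOR_GROUPS.items():
--         taken, rest = [], []
--         for i, col in remaining:
--             if any(kw.lower() in col for kw in keywords):
--                 taken.append(i)
--             else:
--                 rest.append((i, col))
--         if taken:
--             result[group] = taken
--         remaining = rest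
--     if remaining:
--         result["other"] = [i for i, _ in remaining]
--     return result
-- ===== Notes on version B (the rewrite author's own statement) =====
-- stated objective: alternative
-- what changed: Group-major instead of column-major: B iterates over SENSOR_GROUPS as the outer loop, each group claiming matching columns from a shrinking list of still-unassigned (index, lowercased-column) pairs, with leftovers becoming 'other'; A scans columns and searches groups with a break per column.
import Mathlib
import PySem

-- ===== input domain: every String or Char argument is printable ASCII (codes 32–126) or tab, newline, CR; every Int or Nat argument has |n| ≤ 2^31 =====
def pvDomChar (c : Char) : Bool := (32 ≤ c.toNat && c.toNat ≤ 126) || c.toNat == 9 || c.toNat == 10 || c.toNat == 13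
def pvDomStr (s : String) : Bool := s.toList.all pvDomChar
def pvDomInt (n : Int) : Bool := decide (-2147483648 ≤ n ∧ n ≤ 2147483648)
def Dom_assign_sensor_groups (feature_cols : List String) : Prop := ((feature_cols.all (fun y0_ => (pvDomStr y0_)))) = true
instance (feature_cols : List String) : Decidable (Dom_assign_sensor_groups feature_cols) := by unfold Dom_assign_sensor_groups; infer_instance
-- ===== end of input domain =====

-- B assigns columns group-major (each group claims matching columns from a shrinking
-- unassigned list) instead of A's column-major first-match scan; same result, stated objective: alternative.


-- shared module constant SENSOR_GROUPS (insertion-ordered dict of group -> keywords)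
def SENSOR_GROUPS : List (String × List String) :=
  [("pH_alkalinity", ["pH", "pH_lab", "Alkalinity", "alkalinity"]),
   ("temperature",   ["Temperature", "Temp", "temperature", "temp"]),
   ("flow",          ["FlowRate", "Flow", "flow", "HRT", "SRT"]),
   ("organic",       ["COD", "COD_in", "COD_out", "VFA", "BOD", "substrate"]),
   ("gas",           ["GasFlow", "BiogasFlow", "MethaneFlow", "biogas", "methane"]),
   ("solids",        ["TotalSolids", "VolatileSolids", "TSS", "VSS", "MLSS"]),
   ("nutrients",     ["Ammonia", "TKN", "Phosphorus", "Nitrogen"])]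

-- ===== PORT A =====
-- A's inner 'for group, keywords in SENSOR_GROUPS.items(): if any(...): ...; break' loop:
-- the name of the first group whose keywords match, if any
def pvFirstGroup (col : String) : List (String × List String) → Option String
  | [] => none
  | (g, kws) :: rest =>
    if kws.any (fun kw => PySem.Str.isIn (PySem.Str.lower kw) col) then some g
    else pvFirstGroup col rest

def assign_sensor_groups (feature_cols : List String) : List (String × List Int) :=
  let col_lower := feature_cols.map PySem.Str.lower
  let group_indices : PySem.Dict String (List Int) :=
    SENSOR_GROUPS.foldl (fun d g => d.insert g.1 []) PySem.Dict.empty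
  let gi := (PySem.List.enumerate col_lower 0).foldl (fun d p =>
      match pvFirstGroup p.2 SENSOR_GROUPS with
      | some g => d.modify g [] (fun l => l ++ [p.1])
      -- setdefault("other", []).append(i) is exactly d["other"] = d.get("other", []) + [i]
      | none => d.modify "other" [] (fun l => l ++ [p.1])) group_indices
  -- dict comprehension {k: v for k, v in gi.items() if v}: gi's keys are unique, so this is a filter
  gi.items.filter (fun kv => !kv.2.isEmpty)

-- ===== PORT B =====
def assign_sensor_groups_alt (feature_cols : List String) : List (String × List Int) :=
  let remaining0 := PySem.List.enumerate (feature_cols.map PySem.Str.lower) 0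
  let st := SENSOR_GROUPS.foldl
      (fun (st : List (String × List Int) × List (Int × String)) g =>
        let pr := st.2.foldl (fun (tr : List Int × List (Int × String)) p =>
            if g.2.any (fun kw => PySem.Str.isIn (PySem.Str.lower kw) p.2) then
              (tr.1 ++ [p.1], tr.2)
            else (tr.1, tr.2 ++ [p])) ([], [])
        ((if pr.1.isEmpty then st.1 else st.1 ++ [(g.1, pr.1)]), pr.2))
      ([], remaining0)
  if st.2.isEmpty then st.1 else st.1 ++ [("other", st.2.map (fun p => p.1))]

-- ===== PRECONDITION & SPEC =====
def Spec_assign_sensor_groups (feature_cols : List String) (out : List (String × List Int)) : Prop := out = assign_sensor_groups_alt feature_cols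
instance (feature_cols : List String) (out : List (String × List Int)) : Decidable (Spec_assign_sensor_groups feature_cols out) := by unfold Spec_assign_sensor_groups; infer_instance

-- ===== CLAIM (what is proved, stated in full; the proofs are below) =====
def Claim_equal_assign_sensor_groups : Prop := ∀ (feature_cols : List String), Dom_assign_sensor_groups feature_cols → Spec_assign_sensor_groups feature_cols (assign_sensor_groups feature_cols)

-- ===== LEMMAS AND PROOFS =====

-- proof-side helpers
def pvMatches (kws : List String) (col : String) : Bool :=
  kws.any (fun kw => PySem.Str.isIn (PySem.Str.lower kw) col)

def pvKeyOf (col : String) : String := (pvFirstGroup col SENSOR_GROUPS).getD "other"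

def pvCanon : List (String × List String) → List (Int × String) → List (String × List Int)
  | [], rem => if rem.isEmpty then [] else [("other", rem.map (fun p => p.1))]
  | (g, kws) :: gs, rem =>
      (if (rem.filter (fun p => pvMatches kws p.2)).isEmpty then []
       else [(g, (rem.filter (fun p => pvMatches kws p.2)).map (fun p => p.1))])
      ++ pvCanon gs (rem.filter (fun p => !pvMatches kws p.2))

def pvByFirst (gs : List (String × List String)) (rem : List (Int × String)) : List (String × List Int) :=
  (gs.map (fun g' => (g'.1, (rem.filter (fun p => pvFirstGroup p.2 gs == some g'.1)).map (fun p => p.1)))).filter (fun kv => !kv.2.isEmpty)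
  ++ (if (rem.filter (fun p => (pvFirstGroup p.2 gs).isNone)).isEmpty then []
      else [("other", (rem.filter (fun p => (pvFirstGroup p.2 gs).isNone)).map (fun p => p.1))])

-- B's outer-loop body, named for the proofs (definitionally the lambda in the port)
def pvBstep (st : List (String × List Int) × List (Int × String)) (g : String × List String) :
    List (String × List Int) × List (Int × String) :=
  let pr := st.2.foldl (fun (tr : List Int × List (Int × String)) p =>
      if g.2.any (fun kw => PySem.Str.isIn (PySem.Str.lower kw) p.2) then
        (tr.1 ++ [p.1], tr.2)
      else (tr.1, tr.2 ++ [p])) ([], [])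
  ((if pr.1.isEmpty then st.1 else st.1 ++ [(g.1, pr.1)]), pr.2)

def pvFoldA (l : List (Int × String)) (d : PySem.Dict String (List Int)) : PySem.Dict String (List Int) :=
  l.foldl (fun d p => d.modify (pvKeyOf p.2) [] (fun v => v ++ [p.1])) d

theorem pvFirstGroup_mem (gs : List (String × List String)) (col : String) (g : String)
    (h : pvFirstGroup col gs = some g) : g ∈ gs.map (fun x => x.1) := by
  induction gs with
  | nil => simp [pvFirstGroup] at h
  | cons hd tl ih =>
    obtain ⟨g1, kws⟩ := hd
    rw [pvFirstGroup] at h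
    split at h
    · cases h; simp
    · simp [ih h]

theorem pvOther_not_name : "other" ∉ SENSOR_GROUPS.map (fun x => x.1) := by decide

theorem pvKeyOf_eq_name (col : String) (g1 : String)
    (hg : g1 ∈ SENSOR_GROUPS.map (fun x => x.1)) :
    (pvKeyOf col == g1) = (pvFirstGroup col SENSOR_GROUPS == some g1) := by
  cases h : pvFirstGroup col SENSOR_GROUPS with
  | none =>
    have : "other" ≠ g1 := fun he => pvOther_not_name (he ▸ hg)
    simp [pvKeyOf, h, this]
  | some a => simp [pvKeyOf, h]

theorem pvKeyOf_eq_other (col : String) :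
    (pvKeyOf col == "other") = (pvFirstGroup col SENSOR_GROUPS).isNone := by
  cases h : pvFirstGroup col SENSOR_GROUPS with
  | none => simp [pvKeyOf, h]
  | some a =>
    have : a ≠ "other" := fun he => pvOther_not_name (he ▸ pvFirstGroup_mem _ _ _ h)
    simp [pvKeyOf, h, this]

theorem pvPart (q : Int × String → Bool) (l : List (Int × String)) (t : List Int) (r : List (Int × String)) :
    l.foldl (fun tr p => if q p then (tr.1 ++ [p.1], tr.2) else (tr.1, tr.2 ++ [p])) (t, r)
      = (t ++ (l.filter q).map (fun p => p.1), r ++ l.filter (fun p => !q p)) := by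
  induction l generalizing t r with
  | nil => simp
  | cons p l ih =>
    by_cases hq : q p = true
    · simp [hq, ih]
    · simp [hq, ih]

theorem pvIsEmptyMap {α β : Type} (f : α → β) (l : List α) : (l.map f).isEmpty = l.isEmpty := by
  cases l <;> simp

theorem pvBstep_eq (acc : List (String × List Int)) (rem : List (Int × String)) (g : String × List String) :
    pvBstep (acc, rem) g
      = ((if (rem.filter (fun p => pvMatches g.2 p.2)).isEmpty then acc
          else acc ++ [(g.1, (rem.filter (fun p => pvMatches g.2 p.2)).map (fun p => p.1))]),
         rem.filter (fun p => !pvMatches g.2 p.2)) := by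
  unfold pvBstep
  rw [pvPart]
  simp only [List.nil_append, pvIsEmptyMap, pvMatches]

theorem pvBfold (gs : List (String × List String)) (acc : List (String × List Int)) (rem : List (Int × String)) :
    (if (gs.foldl pvBstep (acc, rem)).2.isEmpty then (gs.foldl pvBstep (acc, rem)).1
     else (gs.foldl pvBstep (acc, rem)).1
          ++ [("other", (gs.foldl pvBstep (acc, rem)).2.map (fun p => p.1))])
    = acc ++ pvCanon gs rem := by
  induction gs generalizing acc rem with
  | nil =>
    simp only [List.foldl_nil, pvCanon]
    by_cases h : rem.isEmpty <;> simp [h]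
  | cons g gs ih =>
    obtain ⟨g1, kws⟩ := g
    rw [List.foldl_cons, pvBstep_eq, ih, pvCanon]
    by_cases h : (rem.filter (fun p => pvMatches kws p.2)).isEmpty <;>
      simp [h, List.append_assoc]

theorem pvB_eq (cols : List String) :
    assign_sensor_groups_alt cols
      = pvCanon SENSOR_GROUPS (PySem.List.enumerate (cols.map PySem.Str.lower) 0) := by
  have : assign_sensor_groups_alt cols
      = (if (SENSOR_GROUPS.foldl pvBstep ([], PySem.List.enumerate (cols.map PySem.Str.lower) 0)).2.isEmpty
         then (SENSOR_GROUPS.foldl pvBstep ([], PySem.List.enumerate (cols.map PySem.Str.lower) 0)).1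
         else (SENSOR_GROUPS.foldl pvBstep ([], PySem.List.enumerate (cols.map PySem.Str.lower) 0)).1
              ++ [("other", (SENSOR_GROUPS.foldl pvBstep ([], PySem.List.enumerate (cols.map PySem.Str.lower) 0)).2.map (fun p => p.1))]) := rfl
  rw [this, pvBfold, List.nil_append]

theorem pvKeyOf_cases (col : String) :
    pvKeyOf col ∈ SENSOR_GROUPS.map (fun x => x.1) ∨ pvKeyOf col = "other" := by
  cases h : pvFirstGroup col SENSOR_GROUPS with
  | none => right; simp [pvKeyOf, h]
  | some a => left; simpa [pvKeyOf, h] using pvFirstGroup_mem _ _ _ h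

theorem pvByFirst_eq_canon (gs : List (String × List String)) (rem : List (Int × String))
    (hnd : (gs.map (fun x => x.1)).Nodup) (hoth : "other" ∉ gs.map (fun x => x.1)) :
    pvByFirst gs rem = pvCanon gs rem := by
  induction gs generalizing rem with
  | nil => simp [pvByFirst, pvCanon, pvFirstGroup]
  | cons g gs ih =>
    obtain ⟨g1, kws⟩ := g
    simp only [List.map_cons, List.nodup_cons, List.mem_cons] at hnd hoth
    have hg1 : g1 ∉ gs.map (fun x => x.1) := hnd.1
    have hg1o : g1 ≠ "other" := fun he => hoth (Or.inl he.symm)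
    have hotht : "other" ∉ gs.map (fun x => x.1) := fun hm => hoth (Or.inr hm)
    have hfg : ∀ p : Int × String, pvFirstGroup p.2 ((g1, kws) :: gs)
        = if pvMatches kws p.2 then some g1 else pvFirstGroup p.2 gs := fun p => rfl
    have e1 : rem.filter (fun p => pvFirstGroup p.2 ((g1, kws) :: gs) == some g1)
        = rem.filter (fun p => pvMatches kws p.2) := by
      apply List.filter_congr
      intro p _
      rw [hfg p]
      by_cases hq : pvMatches kws p.2 = true
      · simp [hq]
      · cases ha : pvFirstGroup p.2 gs with
        | none => simp [hq]
        | some a =>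
          have hne : a ≠ g1 := fun he => hg1 (he ▸ pvFirstGroup_mem _ _ _ ha)
          simp [hq, hne]
    have e2 : ∀ g' ∈ gs, rem.filter (fun p => pvFirstGroup p.2 ((g1, kws) :: gs) == some g'.1)
        = (rem.filter (fun p => !pvMatches kws p.2)).filter (fun p => pvFirstGroup p.2 gs == some g'.1) := by
      intro g' hg'
      rw [List.filter_filter]
      apply List.filter_congr
      intro p _
      rw [hfg p]
      by_cases hq : pvMatches kws p.2 = true
      · have hne : g1 ≠ g'.1 := fun he => hg1 (he ▸ List.mem_map_of_mem hg')
        simp [hq, hne]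
      · simp [hq]
    have e3 : rem.filter (fun p => (pvFirstGroup p.2 ((g1, kws) :: gs)).isNone)
        = (rem.filter (fun p => !pvMatches kws p.2)).filter (fun p => (pvFirstGroup p.2 gs).isNone) := by
      rw [List.filter_filter]
      apply List.filter_congr
      intro p _
      rw [hfg p]
      by_cases hq : pvMatches kws p.2 = true
      · simp [hq]
      · simp [hq]
    have etail : (gs.map (fun g' => (g'.1, (rem.filter (fun p => pvFirstGroup p.2 ((g1, kws) :: gs) == some g'.1)).map (fun p => p.1))))
        = gs.map (fun g' => (g'.1, (((rem.filter (fun p => !pvMatches kws p.2)).filter (fun p => pvFirstGroup p.2 gs == some g'.1))).map (fun p => p.1))) := by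
      apply List.map_congr_left
      intro g' hg'
      rw [e2 g' hg']
    rw [pvCanon, ← ih _ hnd.2 hotht]
    show (((g1, kws) :: gs).map _).filter _ ++ _ = _
    rw [List.map_cons, List.filter_cons]
    simp only [e1, e3, etail]
    unfold pvByFirst
    by_cases ht : (rem.filter (fun p => pvMatches kws p.2)).isEmpty = true
    · simp [ht]
    · simp [ht]

theorem pvFoldA_getD (l : List (Int × String)) (d : PySem.Dict String (List Int)) (c : String) :
    (pvFoldA l d).getD c []
      = d.getD c [] ++ (l.filter (fun p => pvKeyOf p.2 == c)).map (fun p => p.1) := by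
  induction l generalizing d with
  | nil => simp [pvFoldA]
  | cons p l ih =>
    rw [pvFoldA, List.foldl_cons, ← pvFoldA, ih, PySem.Dict.getD_modify, List.filter_cons]
    by_cases hc : c = pvKeyOf p.2
    · simp [hc, List.append_assoc]
    · have hb : (pvKeyOf p.2 == c) = false := by
        simpa using Ne.symm hc
      simp [hc, hb]

theorem pvFoldA_keys (l : List (Int × String)) (d : PySem.Dict String (List Int))
    (hc : ∀ g ∈ SENSOR_GROUPS, d.contains g.1 = true) :
    (pvFoldA l d).keys
      = d.keys ++ (if (!d.contains "other" && l.any (fun p => pvKeyOf p.2 == "other")) = true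
                   then ["other"] else []) := by
  induction l generalizing d with
  | nil => simp [pvFoldA]
  | cons p l ih =>
    rw [pvFoldA, List.foldl_cons, ← pvFoldA]
    have hc' : ∀ g ∈ SENSOR_GROUPS,
        (d.modify (pvKeyOf p.2) [] (fun v => v ++ [p.1])).contains g.1 = true := by
      intro g hg
      rw [PySem.Dict.contains_modify]
      simp [hc g hg]
    rw [ih _ hc']
    rcases pvKeyOf_cases p.2 with hk | hk
    · -- the column got a real group: key already present, keys unchanged
      obtain ⟨g, hg, hgk⟩ := List.mem_map.mp hk
      have hck : d.contains (pvKeyOf p.2) = true := hgk ▸ hc g hg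
      have hko : (pvKeyOf p.2 == "other") = false := by
        have : pvKeyOf p.2 ≠ "other" := fun he => pvOther_not_name (he ▸ hk)
        simpa using this
      have hob : ("other" == pvKeyOf p.2) = false :=
        beq_eq_false_iff_ne.mpr (fun he => pvOther_not_name (he.symm ▸ hk))
      rw [PySem.Dict.keys_modify, PySem.Dict.keys_insert_of_contains _ _ hck,
          PySem.Dict.contains_modify]
      simp only [List.any_cons, hob, hko, Bool.false_or]
    · -- the column fell through to "other"
      rw [hk]
      by_cases hco : d.contains "other" = true
      · rw [PySem.Dict.keys_modify, PySem.Dict.keys_insert_of_contains _ _ hco,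
            PySem.Dict.contains_modify]
        simp [hco]
      · have hco' : d.contains "other" = false := by simpa using hco
        rw [PySem.Dict.keys_modify, PySem.Dict.keys_insert_of_not_contains _ _ hco',
            PySem.Dict.contains_modify]
        simp [hco', List.any_cons, hk]

theorem pvItems_eq {ν : Type} (d : PySem.Dict String ν) (v0 : ν) (h : d.keys.Nodup) :
    d.items = d.keys.map (fun k => (k, d.getD k v0)) := by
  have hk : d.keys = d.items.map (fun p => p.1) := rfl
  rw [hk, List.map_map]
  symm
  calc d.items.map ((fun k => (k, d.getD k v0)) ∘ fun p => p.1)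
      = d.items.map id := by
        apply List.map_congr_left
        intro p hp
        have : d.getD p.1 v0 = p.2 := PySem.Dict.getD_of_mem_items d (by simpa using hp) h v0
        simp [this]
    _ = d.items := List.map_id _

def pvD0 : PySem.Dict String (List Int) :=
  SENSOR_GROUPS.foldl (fun d g => d.insert g.1 []) PySem.Dict.empty

theorem pvD0_keys : pvD0.keys = SENSOR_GROUPS.map (fun x => x.1) := by decide
theorem pvD0_contains : ∀ g ∈ SENSOR_GROUPS, pvD0.contains g.1 = true := by decide
theorem pvD0_other : pvD0.contains "other" = false := by decide
theorem pvD0_getD : ∀ g ∈ SENSOR_GROUPS, pvD0.getD g.1 [] = ([] : List Int) := by decide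
theorem pvD0_getD_other : pvD0.getD "other" [] = ([] : List Int) := by decide

theorem pvA_eq (cols : List String) :
    assign_sensor_groups cols
      = pvByFirst SENSOR_GROUPS (PySem.List.enumerate (cols.map PySem.Str.lower) 0) := by
  have hfun : (fun (d : PySem.Dict String (List Int)) (p : Int × String) =>
      match pvFirstGroup p.2 SENSOR_GROUPS with
      | some g => d.modify g [] (fun v => v ++ [p.1])
      | none => d.modify "other" [] (fun v => v ++ [p.1]))
      = (fun (d : PySem.Dict String (List Int)) (p : Int × String) =>
          d.modify (pvKeyOf p.2) [] (fun v => v ++ [p.1])) := by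
    funext d p
    cases h : pvFirstGroup p.2 SENSOR_GROUPS <;> simp [pvKeyOf, h]
  have hstep : assign_sensor_groups cols
      = (pvFoldA (PySem.List.enumerate (cols.map PySem.Str.lower) 0) pvD0).items.filter
          (fun kv => !kv.2.isEmpty) := by
    simp only [assign_sensor_groups, pvFoldA, pvD0]
    rw [hfun]
  generalize hlL : PySem.List.enumerate (cols.map PySem.Str.lower) 0 = l at hstep ⊢
  have hsel : ∀ g' ∈ SENSOR_GROUPS, l.filter (fun p => pvKeyOf p.2 == g'.1)
      = l.filter (fun p => pvFirstGroup p.2 SENSOR_GROUPS == some g'.1) :=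
    fun g' hg' => List.filter_congr
      (fun p _ => pvKeyOf_eq_name p.2 g'.1 (List.mem_map_of_mem hg'))
  have hselo : l.filter (fun p => pvKeyOf p.2 == "other")
      = l.filter (fun p => (pvFirstGroup p.2 SENSOR_GROUPS).isNone) :=
    List.filter_congr (fun p _ => pvKeyOf_eq_other p.2)
  have hnamesmap : (SENSOR_GROUPS.map (fun x => x.1)).map
        (fun k => (k, (pvFoldA l pvD0).getD k []))
      = SENSOR_GROUPS.map (fun g' => (g'.1,
          (l.filter (fun p => pvFirstGroup p.2 SENSOR_GROUPS == some g'.1)).map (fun p => p.1))) := by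
    rw [List.map_map]
    apply List.map_congr_left
    intro g' hg'
    simp only [Function.comp]
    rw [pvFoldA_getD, pvD0_getD g' hg', hsel g' hg', List.nil_append]
  by_cases hany : (l.any (fun p => pvKeyOf p.2 == "other")) = true
  · have keysEq : (pvFoldA l pvD0).keys = SENSOR_GROUPS.map (fun x => x.1) ++ ["other"] := by
      rw [pvFoldA_keys l pvD0 pvD0_contains, pvD0_keys]
      simp [pvD0_other, hany]
    have hnod : (pvFoldA l pvD0).keys.Nodup := by rw [keysEq]; decide
    have hoe : ["other"].map (fun k => (k, (pvFoldA l pvD0).getD k []))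
        = [("other", (l.filter (fun p => (pvFirstGroup p.2 SENSOR_GROUPS).isNone)).map (fun p => p.1))] := by
      simp only [List.map_cons, List.map_nil]
      rw [pvFoldA_getD, pvD0_getD_other, hselo, List.nil_append]
    have hne : l.filter (fun p => (pvFirstGroup p.2 SENSOR_GROUPS).isNone) ≠ [] := by
      rw [← hselo]
      obtain ⟨p, hp, hpp⟩ := List.any_eq_true.mp hany
      exact List.ne_nil_of_mem (List.mem_filter.mpr ⟨hp, hpp⟩)
    have hie : (l.filter (fun p => (pvFirstGroup p.2 SENSOR_GROUPS).isNone)).isEmpty = false := by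
      simpa [List.isEmpty_iff] using hne
    rw [hstep, pvItems_eq _ ([] : List Int) hnod, keysEq, List.map_append, List.filter_append,
        hnamesmap, hoe]
    unfold pvByFirst
    rw [hie]
    simp [hie]
  · have hany' : (l.any (fun p => pvKeyOf p.2 == "other")) = false := by simpa using hany
    have keysEq : (pvFoldA l pvD0).keys = SENSOR_GROUPS.map (fun x => x.1) := by
      rw [pvFoldA_keys l pvD0 pvD0_contains, pvD0_keys]
      simp [hany']
    have hnod : (pvFoldA l pvD0).keys.Nodup := by rw [keysEq]; decide
    have hfil : l.filter (fun p => (pvFirstGroup p.2 SENSOR_GROUPS).isNone) = [] := by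
      rw [← hselo]
      exact List.filter_eq_nil_iff.mpr
        (fun p hp => by simpa using List.any_eq_false.mp hany' p hp)
    rw [hstep, pvItems_eq _ ([] : List Int) hnod, keysEq, hnamesmap]
    unfold pvByFirst
    rw [hfil]
    simp

-- ===== VERDICT (by name: the statement is the Claim_ definition above) =====
theorem assign_sensor_groups_spec : Claim_equal_assign_sensor_groups := by
  intro cols _
  unfold Spec_assign_sensor_groups
  rw [pvA_eq, pvByFirst_eq_canon _ _ (by decide) (by decide), pvB_eq]
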